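-- pv_equiv track=rewrite | github.com/maxkim77/Codingtest | 프로그래머스/0/120812. 최빈값 구하기/최빈값 구하기.py | solution
-- ===== SOURCE A (Python) =====
-- from collections import Counter
--
-- def solution(array):
--     #배열의 각 원소의 빈도수 계산
--     freq = Counter(array)
--
--     #가장 높은 빈도수 찾기
--     max_freq = max(freq.values())
--
--     #가장 높은 빈도수를 가진 원소들 찾기
--     mode_values = [key for key, value in freq.items() if value == max_freq]
--
--     #최빈값이 1개만 있으면 그값을 반환, 그렇지 않으면 -1 반환
--     if len(mode_values) == 1:
--         return mode_values[0]
--     else: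
--         return -1
-- ===== SOURCE B (Python) =====
-- def solution(array):
--     # Streaming mode: one pass, track current count per value, the running
--     # maximum count, its first achiever, and whether it is tied.
--     counts = {}
--     best, cnt, tie = -1, 0, False
--     for x in array:
--         c = counts.get(x, 0) + 1
--         counts[x] = c
--         if c > cnt:
--             best, cnt, tie = x, c, False
--         elif c == cnt:
--             tie = True
--     return -1 if tie else best
-- ===== Notes on version B (the rewrite author's own statement) =====
-- stated objective: alternative
-- what changed: Replaces Counter + separate max pass + filter pass by a single streaming pass that maintains per-value counts together with the running maximum count, its first achiever and a tie flag; clause: A raises ValueError on the empty array (max of empty), which Pre_ excludes, while B naturally returns -1 there.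
-- outside the precondition, e.g. on solution([]): A raises ValueError, B returns -1
import Mathlib
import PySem

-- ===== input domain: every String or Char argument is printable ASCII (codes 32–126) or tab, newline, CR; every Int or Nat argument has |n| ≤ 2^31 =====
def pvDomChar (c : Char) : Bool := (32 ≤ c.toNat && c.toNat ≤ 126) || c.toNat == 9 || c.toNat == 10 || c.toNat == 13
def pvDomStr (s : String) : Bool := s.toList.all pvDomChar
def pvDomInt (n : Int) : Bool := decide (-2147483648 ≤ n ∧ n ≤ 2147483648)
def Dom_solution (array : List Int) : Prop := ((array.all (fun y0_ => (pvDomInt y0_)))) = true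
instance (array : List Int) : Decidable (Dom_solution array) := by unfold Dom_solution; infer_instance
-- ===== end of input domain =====

-- B replaces A's Counter + max pass + filter pass by one streaming pass tracking the running
-- maximum count, its first achiever and a tie flag (alternative decomposition, same O(n) cost).

-- ===== PORT A =====
def solution (array : List Int) : Int :=
  -- freq = Counter(array)
  let freq := array.foldl (fun d x => d.modify x 0 (· + 1)) (PySem.Dict.empty : PySem.Dict Int Int)
  -- max_freq = max(freq.values())  (ValueError on empty → none; excluded by Pre_solution)
  match PySem.List.max? freq.values (fun v => v) with
  | none => 0
  | some maxFreq =>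
    -- mode_values = [key for key, value in freq.items() if value == max_freq]
    let modeValues := (freq.items.filter (fun p => p.2 == maxFreq)).map (fun p => p.1)
    -- return mode_values[0] if unique else -1  (headI is exact: the branch guarantees length 1)
    if modeValues.length == 1 then modeValues.headI else -1

-- ===== PORT B =====
-- loop body: c = counts.get(x,0)+1; counts[x] = c; update (best, cnt, tie)
def pvStep (st : PySem.Dict Int Int × Int × Int × Bool) (x : Int) :
    PySem.Dict Int Int × Int × Int × Bool :=
  let c := st.1.getD x 0 + 1
  let counts' := st.1.insert x c
  if c > st.2.2.1 then (counts', x, c, false)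
  else if c == st.2.2.1 then (counts', st.2.1, st.2.2.1, true)
  else (counts', st.2.1, st.2.2.1, st.2.2.2)

def solution_alt (array : List Int) : Int :=
  let st := array.foldl pvStep (PySem.Dict.empty, -1, 0, false)
  if st.2.2.2 then -1 else st.2.1

-- ===== PRECONDITION & SPEC =====
-- Pre_ excludes only the empty array, on which A raises ValueError (max of an empty sequence).
def Pre_solution (array : List Int) : Prop := array ≠ []
instance (array : List Int) : Decidable (Pre_solution array) := by unfold Pre_solution; infer_instance
def pvWitness_solution : List Int := ([1])

def Spec_solution (array : List Int) (out : Int) : Prop := out = solution_alt array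
instance (array : List Int) (out : Int) : Decidable (Spec_solution array out) := by unfold Spec_solution; infer_instance

-- ===== CLAIM (what is proved, stated in full; the proofs are below) =====
def Claim_equal_solution : Prop := ∀ (array : List Int), Dom_solution array → Pre_solution array → Spec_solution array (solution array)

-- ===== LEMMAS AND PROOFS =====

-- Loop invariant for B's streaming pass over the processed prefix p.
def pvInv (p : List Int) (st : PySem.Dict Int Int × Int × Int × Bool) : Prop :=
  (∀ k : Int, st.1.getD k 0 = (p.count k : Int)) ∧
  (∀ k ∈ p, (p.count k : Int) ≤ st.2.2.1) ∧
  (p = [] → st.2.2.1 = 0 ∧ st.2.2.2 = false) ∧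
  (p ≠ [] → ∃ k ∈ p, (p.count k : Int) = st.2.2.1) ∧
  (st.2.2.2 = false → p ≠ [] → st.2.1 ∈ p ∧ (p.count st.2.1 : Int) = st.2.2.1 ∧
      ∀ k ∈ p, (p.count k : Int) = st.2.2.1 → k = st.2.1) ∧
  (st.2.2.2 = true → ∃ k1 ∈ p, ∃ k2 ∈ p, k1 ≠ k2 ∧
      (p.count k1 : Int) = st.2.2.1 ∧ (p.count k2 : Int) = st.2.2.1)

lemma pvInv_step (p : List Int) (st : PySem.Dict Int Int × Int × Int × Bool) (x : Int)
    (h : pvInv p st) : pvInv (p ++ [x]) (pvStep st x) := by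
  obtain ⟨d, b, c0, t⟩ := st
  obtain ⟨h1, h2, h3, h4, h5, h6⟩ := h
  dsimp only at h1 h2 h3 h4 h5 h6
  have hx : (p ++ [x]).count x = p.count x + 1 := by simp
  have hne : ∀ k : Int, k ≠ x → (p ++ [x]).count k = p.count k := by
    intro k hk
    have hxk : ¬ x = k := fun hq => hk hq.symm
    simp [List.count_append, hxk]
  have hmem : ∀ k : Int, k ∈ p ++ [x] ↔ k ∈ p ∨ k = x := by
    intro k; simp [List.mem_append]
  have hcnt0 : (0:Int) ≤ (p.count x : Int) := Int.natCast_nonneg _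
  simp only [pvStep, h1]
  split_ifs with hgt heq
  · -- c > cnt : new state (counts', x, c, false)
    dsimp only [pvInv]
    refine ⟨?_, ?_, ?_, ?_, ?_, ?_⟩
    · intro k
      rw [PySem.Dict.getD_insert]
      by_cases hk : k = x
      · subst hk; rw [if_pos rfl, hx]; push_cast; ring
      · rw [if_neg hk, hne k hk, h1]
    · intro k hk
      by_cases hkx : k = x
      · subst hkx; rw [hx]; push_cast; omega
      · have hkp : k ∈ p := ((hmem k).mp hk).resolve_right hkx
        have := h2 k hkp
        rw [hne k hkx]; omega
    · intro habs; simp at habs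
    · intro _
      exact ⟨x, by simp, by rw [hx]; push_cast; ring⟩
    · intro _ _
      refine ⟨by simp, by rw [hx]; push_cast; ring, ?_⟩
      intro k hk hkc
      by_contra hkx
      have hkp : k ∈ p := ((hmem k).mp hk).resolve_right hkx
      have := h2 k hkp
      rw [hne k hkx] at hkc
      omega
    · intro habs; simp at habs
  · -- c == cnt : new state (counts', b, c0, true)
    rw [beq_iff_eq] at heq
    have hpne : p ≠ [] := by
      intro hp
      have h30 := (h3 hp).1
      rw [hp] at heq
      simp at heq
      omega
    dsimp only [pvInv]
    refine ⟨?_, ?_, ?_, ?_, ?_, ?_⟩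
    · intro k
      rw [PySem.Dict.getD_insert]
      by_cases hk : k = x
      · subst hk; rw [if_pos rfl, hx]; push_cast; ring
      · rw [if_neg hk, hne k hk, h1]
    · intro k hk
      by_cases hkx : k = x
      · subst hkx; rw [hx]; push_cast; omega
      · have hkp : k ∈ p := ((hmem k).mp hk).resolve_right hkx
        have := h2 k hkp
        rw [hne k hkx]; omega
    · intro habs; simp at habs
    · intro _
      exact ⟨x, by simp, by rw [hx]; push_cast; omega⟩
    · intro habs; simp at habs
    · intro _
      obtain ⟨k, hk, hkc⟩ := h4 hpne
      have hkx : k ≠ x := by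
        intro hkxeq; subst hkxeq; omega
      refine ⟨x, by simp, k, by simp [hk], fun hxk => hkx hxk.symm, ?_, ?_⟩
      · rw [hx]; push_cast; omega
      · rw [hne k hkx]; exact hkc
  · -- c < cnt : new state (counts', b, c0, t)
    have heq' : ¬ ((p.count x : Int) + 1 = c0) := by simpa using heq
    have hclt : (p.count x : Int) + 1 < c0 := by omega
    have hpne : p ≠ [] := by
      intro hp
      have h30 := (h3 hp).1
      rw [hp] at hclt
      simp at hclt
      omega
    dsimp only [pvInv]
    refine ⟨?_, ?_, ?_, ?_, ?_, ?_⟩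
    · intro k
      rw [PySem.Dict.getD_insert]
      by_cases hk : k = x
      · subst hk; rw [if_pos rfl, hx]; push_cast; ring
      · rw [if_neg hk, hne k hk, h1]
    · intro k hk
      by_cases hkx : k = x
      · subst hkx; rw [hx]; push_cast; omega
      · have hkp : k ∈ p := ((hmem k).mp hk).resolve_right hkx
        have := h2 k hkp
        rw [hne k hkx]; omega
    · intro habs; simp at habs
    · intro _
      obtain ⟨k, hk, hkc⟩ := h4 hpne
      have hkx : k ≠ x := by intro hkxeq; subst hkxeq; omega
      exact ⟨k, by simp [hk], by rw [hne k hkx]; exact hkc⟩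
    · intro ht _
      obtain ⟨hbmem, hbc, huniq⟩ := h5 ht hpne
      have hbx : b ≠ x := by intro hbxeq; subst hbxeq; omega
      refine ⟨by simp [hbmem], by rw [hne b hbx]; exact hbc, ?_⟩
      intro k hk hkc
      by_cases hkx : k = x
      · subst hkx; rw [hx] at hkc; push_cast at hkc; omega
      · have hkp : k ∈ p := ((hmem k).mp hk).resolve_right hkx
        rw [hne k hkx] at hkc
        exact huniq k hkp hkc
    · intro ht
      obtain ⟨k1, hk1, k2, hk2, h12, hc1, hc2⟩ := h6 ht
      have hk1x : k1 ≠ x := by intro hq; subst hq; omega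
      have hk2x : k2 ≠ x := by intro hq; subst hq; omega
      exact ⟨k1, by simp [hk1], k2, by simp [hk2], h12,
        by rw [hne k1 hk1x]; exact hc1, by rw [hne k2 hk2x]; exact hc2⟩

lemma pvInv_foldl (l : List Int) : ∀ (p : List Int) (st : PySem.Dict Int Int × Int × Int × Bool),
    pvInv p st → pvInv (p ++ l) (l.foldl pvStep st) := by
  induction l with
  | nil => intro p st h; simpa using h
  | cons x l ih =>
      intro p st h
      have := ih (p ++ [x]) (pvStep st x) (pvInv_step p st x h)
      simpa [List.append_assoc] using this

lemma pvInv_init : pvInv [] (PySem.Dict.empty, -1, 0, false) := by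
  refine ⟨?_, ?_, ?_, ?_, ?_, ?_⟩ <;> simp [PySem.Dict.getD_empty]

lemma pvFilter_singleton (l : List Int) (q : Int → Bool) (b : Int)
    (hnd : l.Nodup) (hb : b ∈ l) (hq : ∀ k ∈ l, q k = true ↔ k = b) :
    l.filter q = [b] := by
  induction l with
  | nil => simp at hb
  | cons a l ih =>
      rcases List.nodup_cons.mp hnd with ⟨hal, hl⟩
      by_cases hqa : q a = true
      · have hab : a = b := (hq a List.mem_cons_self).mp hqa
        have hfl : l.filter q = [] := by
          apply List.filter_eq_nil_iff.mpr
          intro k hk hqk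
          have hkb : k = b := (hq k (List.mem_cons_of_mem _ hk)).mp hqk
          have hk' : a ∈ l := by rw [hab, ← hkb]; exact hk
          exact hal hk'
        rw [List.filter_cons_of_pos hqa, hfl, hab]
      · have hqa' : q a = false := by cases hqe : q a <;> simp_all
        have hbl : b ∈ l := by
          rcases List.mem_cons.mp hb with hba | hbl
          · exact absurd ((hq a List.mem_cons_self).mpr hba.symm) (by simp [hqa'])
          · exact hbl
        rw [List.filter_cons_of_neg (by simp [hqa']),
          ih hl hbl (fun k hk => hq k (List.mem_cons_of_mem _ hk))]

lemma pvTwo_mem_length {a b : Int} {l : List Int} (ha : a ∈ l) (hb : b ∈ l) (hab : a ≠ b) :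
    1 < l.length := by
  cases l with
  | nil => simp at ha
  | cons c tl =>
      cases tl with
      | nil =>
          simp at ha hb
          exact absurd (ha.trans hb.symm) hab
      | cons e tl2 => simp only [List.length_cons]; omega

lemma pvMain (array : List Int) (hpre : array ≠ []) : solution array = solution_alt array := by
  have hInv : pvInv array (array.foldl pvStep (PySem.Dict.empty, -1, 0, false)) := by
    simpa using pvInv_foldl array [] (PySem.Dict.empty, -1, 0, false) pvInv_init
  obtain ⟨⟨d, b, c0, t⟩, hfold⟩ :
      ∃ st, array.foldl pvStep (PySem.Dict.empty, -1, 0, false) = st := ⟨_, rfl⟩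
  rw [hfold] at hInv
  obtain ⟨h1, h2, h3, h4, h5, h6⟩ := hInv
  dsimp only at h1 h2 h3 h4 h5 h6
  have hvals : (PySem.Dict.counter array).values
      = (PySem.Set.ofList array).map (fun k => (array.count k : Int)) := by
    simp [PySem.Dict.values, PySem.Dict.items_counter, List.map_map, Function.comp]
  simp only [solution, solution_alt, hfold]
  have hcc : (List.foldl (fun d x => d.modify x 0 fun x => x + 1) (PySem.Dict.empty : PySem.Dict Int Int) array)
      = PySem.Dict.counter array := rfl
  simp only [hcc, hvals]
  cases hM : PySem.List.max? ((PySem.Set.ofList array).map fun k => (array.count k : Int)) fun v => v with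
  | none =>
      rw [PySem.List.max?_eq_none_iff] at hM
      obtain ⟨a, tl, hat⟩ := List.exists_cons_of_ne_nil hpre
      have ha : a ∈ PySem.Set.ofList array :=
        (PySem.Set.mem_ofList array a).mpr (by rw [hat]; simp)
      rw [List.map_eq_nil_iff] at hM
      rw [hM] at ha
      simp at ha
  | some M =>
      dsimp only
      have hMmem := PySem.List.max?_mem hM
      have hMmax := PySem.List.max?_isMax hM
      have hMc0 : M = c0 := by
        obtain ⟨k, hk, hkM⟩ := List.mem_map.mp hMmem
        have hka : k ∈ array := (PySem.Set.mem_ofList array k).mp hk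
        have hle1 : M ≤ c0 := by rw [← hkM]; exact h2 k hka
        obtain ⟨k0, hk0, hk0c⟩ := h4 hpre
        have hv : (array.count k0 : Int)
            ∈ (PySem.Set.ofList array).map (fun k => (array.count k : Int)) :=
          List.mem_map.mpr ⟨k0, (PySem.Set.mem_ofList array k0).mpr hk0, rfl⟩
        have hle2 : (array.count k0 : Int) ≤ M := hMmax _ hv
        omega
      subst hMc0
      have hmodes : (((PySem.Dict.counter array).items.filter (fun p => p.2 == M)).map (fun p => p.1))
          = (PySem.Set.ofList array).filter (fun k => (array.count k : Int) == M) := by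
        simp [PySem.Dict.items_counter, List.filter_map, List.map_map, Function.comp_def]
      rw [hmodes]
      cases t with
      | true =>
          obtain ⟨k1, hk1, k2, hk2, h12, hc1, hc2⟩ := h6 rfl
          have hm1 : k1 ∈ (PySem.Set.ofList array).filter (fun k => (array.count k : Int) == M) :=
            List.mem_filter.mpr ⟨(PySem.Set.mem_ofList array k1).mpr hk1, by simp [hc1]⟩
          have hm2 : k2 ∈ (PySem.Set.ofList array).filter (fun k => (array.count k : Int) == M) :=
            List.mem_filter.mpr ⟨(PySem.Set.mem_ofList array k2).mpr hk2, by simp [hc2]⟩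
          have hlen := pvTwo_mem_length hm1 hm2 h12
          have hcond : (((PySem.Set.ofList array).filter
              (fun k => (array.count k : Int) == M)).length == 1) = false := by
            simp only [beq_eq_false_iff_ne, ne_eq]
            omega
          rw [hcond]
          simp
      | false =>
          obtain ⟨hbmem, hbc, huniq⟩ := h5 rfl hpre
          have hfil : (PySem.Set.ofList array).filter (fun k => (array.count k : Int) == M) = [b] := by
            apply pvFilter_singleton _ _ b (PySem.Set.nodup_ofList array)
              ((PySem.Set.mem_ofList array b).mpr hbmem)
            intro k hk
            constructor
            · intro hq
              rw [beq_iff_eq] at hq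
              exact huniq k ((PySem.Set.mem_ofList array k).mp hk) hq
            · intro hq; subst hq; simp [hbc]
          rw [hfil]
          simp

-- ===== VERDICT (by name: the statement is the Claim_ definition above) =====
theorem solution_spec : Claim_equal_solution := by
  intro array _ hpre
  unfold Spec_solution
  exact pvMain array hpre
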